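-- pv_equiv track=rewrite | github.com/Tonyhwl/Yahtzee-Simulation | Yahtzee_Random_Baseline.py | score_roll
-- ===== SOURCE A (Python) =====
-- from collections import Counter
--
-- def score_roll(dice):
--     counts = Counter(dice)
--     values = list(counts.values())
--     score = sum(dice)  # Chance is always available
--
--     if max(values) >= 3:
--         score = max(score, sum(dice))
--     if max(values) >= 4:
--         score = max(score, sum(dice))
--     if sorted(values) == [2, 3]:
--         score = max(score, 25)
--     unique = set(dice)
--     if any(s.issubset(unique) for s in [{1,2,3,4},{2,3,4,5},{3,4,5,6}]):
--         score = max(score, 30)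
--     if any(s.issubset(unique) for s in [{1,2,3,4,5},{2,3,4,5,6}]):
--         score = max(score, 40)
--     if max(values) == 5:
--         score = max(score, 50)
--
--     return score
-- ===== SOURCE B (Python) =====
-- def score_roll(dice):
--     counts = {}
--     for d in dice:
--         counts[d] = counts.get(d, 0) + 1
--     vals = list(counts.values())
--     m = max(vals)  # ValueError on empty dice, as in the original
--     candidates = [sum(dice)]
--     if len(counts) == 2 and m == 3 and min(vals) == 2:
--         candidates.append(25)  # full house
--     u = [v for v in range(1, 7) if v in counts]
--     run = best = 0
--     prev = None
--     for v in u: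
--         run = run + 1 if prev == v - 1 else 1
--         best = max(best, run)
--         prev = v
--     if best >= 4:
--         candidates.append(30)  # small straight
--     if best >= 5:
--         candidates.append(40)  # large straight
--     if m == 5:
--         candidates.append(50)  # yahtzee
--     return max(candidates)
-- ===== Notes on version B (the rewrite author's own statement) =====
-- stated objective: simpler
-- what changed: Replaces the three/two fixed straight-subset tests with a single longest-consecutive-run scan over the distinct values 1-6, detects full house from the count dictionary's size/max/min instead of sorting its values, drops the two no-op three/four-of-a-kind branches, and collects candidates in a list maximised once instead of repeatedly rebinding score.
import Mathlib
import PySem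

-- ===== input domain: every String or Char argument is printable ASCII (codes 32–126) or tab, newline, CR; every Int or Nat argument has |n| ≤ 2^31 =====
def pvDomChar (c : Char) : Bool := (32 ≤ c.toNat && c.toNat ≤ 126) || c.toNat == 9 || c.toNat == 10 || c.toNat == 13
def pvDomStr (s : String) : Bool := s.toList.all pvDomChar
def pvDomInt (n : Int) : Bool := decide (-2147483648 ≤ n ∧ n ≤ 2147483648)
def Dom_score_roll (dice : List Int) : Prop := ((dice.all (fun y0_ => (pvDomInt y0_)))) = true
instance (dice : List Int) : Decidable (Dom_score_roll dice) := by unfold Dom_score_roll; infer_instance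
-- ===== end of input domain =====

-- B scores the roll as one max over a candidate list: straights via a longest-consecutive-run scan
-- over the distinct values 1..6, full house via the count dict's size/max/min, no-op branches dropped.
-- Pre_ excludes only the empty roll, where both Pythons raise ValueError (max() of an empty collection).


-- ===== PORT A =====
def score_roll (dice : List Int) : Int :=
  let counts := PySem.Dict.counter dice
  let values := counts.values
  let score := dice.sum
  let score := if (PySem.List.max? values (fun v => v)).getD 0 ≥ 3 then max score dice.sum else score
  let score := if (PySem.List.max? values (fun v => v)).getD 0 ≥ 4 then max score dice.sum else score
  let score := if PySem.List.sorted values (fun v => v) = [2, 3] then max score 25 else score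
  let uniq := PySem.Set.ofList dice
  let score := if ([[1,2,3,4],[2,3,4,5],[3,4,5,6]] : List (List Int)).any
      (fun s => PySem.Set.issubset s uniq) then max score 30 else score
  let score := if ([[1,2,3,4,5],[2,3,4,5,6]] : List (List Int)).any
      (fun s => PySem.Set.issubset s uniq) then max score 40 else score
  let score := if (PySem.List.max? values (fun v => v)).getD 0 = 5 then max score 50 else score
  score

-- ===== PORT B =====
def score_roll_alt (dice : List Int) : Int :=
  let counts := dice.foldl (fun d x => d.insert x (d.getD x 0 + 1)) (PySem.Dict.empty : PySem.Dict Int Int)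
  let vals := counts.values
  let m := (PySem.List.max? vals (fun v => v)).getD 0
  let candidates := [dice.sum]
  let candidates := if counts.size = 2 ∧ m = 3 ∧ (PySem.List.min? vals (fun v => v)).getD 0 = 2
    then candidates ++ [25] else candidates
  let u := (PySem.List.pyRange 1 7 1).filter (fun v => counts.contains v)
  let st := u.foldl (fun (st : Int × Int × Option Int) v =>
      let run := if st.2.2 = some (v - 1) then st.1 + 1 else 1
      (run, max st.2.1 run, some v)) (0, 0, none)
  let best := st.2.1
  let candidates := if best ≥ 4 then candidates ++ [30] else candidates
  let candidates := if best ≥ 5 then candidates ++ [40] else candidates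
  let candidates := if m = 5 then candidates ++ [50] else candidates
  (PySem.List.max? candidates (fun v => v)).getD 0

-- ===== PRECONDITION & SPEC =====
-- Pre_ excludes exactly the empty list: there both Pythons raise ValueError (max() of an empty collection).
def Pre_score_roll (dice : List Int) : Prop := dice ≠ []
instance (dice : List Int) : Decidable (Pre_score_roll dice) := by unfold Pre_score_roll; infer_instance
def pvWitness_score_roll : List Int := ([1, 2, 3, 4, 5])

def Spec_score_roll (dice : List Int) (out : Int) : Prop := out = score_roll_alt dice
instance (dice : List Int) (out : Int) : Decidable (Spec_score_roll dice out) := by unfold Spec_score_roll; infer_instance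

-- ===== CLAIM (what is proved, stated in full; the proofs are below) =====
def Claim_equal_score_roll : Prop := ∀ (dice : List Int), Dom_score_roll dice → Pre_score_roll dice → Spec_score_roll dice (score_roll dice)

-- ===== LEMMAS AND PROOFS =====

-- full house: sorted(values) == [2,3] iff the dict has 2 entries whose max is 3 and min is 2
lemma fullhouse_iff (vs : List Int) :
    (PySem.List.sorted vs (fun v => v) = [2, 3]) ↔
      (vs.length = 2 ∧ (PySem.List.max? vs (fun v => v)).getD 0 = 3 ∧
        (PySem.List.min? vs (fun v => v)).getD 0 = 2) := by
  constructor
  · intro h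
    have hp : vs.Perm [2, 3] := by
      have := PySem.List.sorted_perm vs (fun v => v) false
      rw [h] at this; exact this.symm
    have hlen : vs.length = 2 := by simpa using hp.length_eq
    match vs, hlen with
    | [a, b], _ =>
      have h2 : (2 : Int) ∈ [a, b] := hp.mem_iff.mpr (by simp)
      have h3 : (3 : Int) ∈ [a, b] := hp.mem_iff.mpr (by simp)
      simp only [List.mem_cons, List.not_mem_nil, or_false] at h2 h3
      rcases h2 with h2 | h2 <;> rcases h3 with h3 | h3 <;>
        simp_all [PySem.List.max?_id_cons, PySem.List.min?_id_cons] <;> omega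
  · rintro ⟨hlen, hmax, hmin⟩
    match vs, hlen with
    | [a, b], _ =>
      simp only [PySem.List.max?_id_cons, PySem.List.min?_id_cons, List.foldl,
        Option.getD_some] at hmax hmin
      have hab : (a = 2 ∧ b = 3) ∨ (a = 3 ∧ b = 2) := by
        rcases le_total a b with h | h
        · left; constructor <;> omega
        · right; constructor <;> omega
      apply PySem.List.sorted_eq_of_perm_of_pairwise_lt
      · rcases hab with ⟨ha, hb⟩ | ⟨ha, hb⟩ <;> subst ha <;> subst hb
        · exact List.Perm.refl _
        · exact List.Perm.swap _ _ _
      · simp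

-- straights: A's fixed subset tests match B's longest-consecutive-run scan over the distinct values 1..6
set_option maxHeartbeats 8000000 in
lemma straights_iff (dice : List Int) :
    ((([[1,2,3,4],[2,3,4,5],[3,4,5,6]] : List (List Int)).any
        (fun s => PySem.Set.issubset s (PySem.Set.ofList dice)) = true ↔
      ((([1,2,3,4,5,6] : List Int).filter (fun v => dice.contains v)).foldl
        (fun (st : Int × Int × Option Int) v =>
          let run := if st.2.2 = some (v - 1) then st.1 + 1 else 1
          (run, max st.2.1 run, some v)) (0, 0, none)).2.1 ≥ 4)
    ∧ (([[1,2,3,4,5],[2,3,4,5,6]] : List (List Int)).any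
        (fun s => PySem.Set.issubset s (PySem.Set.ofList dice)) = true ↔
      ((([1,2,3,4,5,6] : List Int).filter (fun v => dice.contains v)).foldl
        (fun (st : Int × Int × Option Int) v =>
          let run := if st.2.2 = some (v - 1) then st.1 + 1 else 1
          (run, max st.2.1 run, some v)) (0, 0, none)).2.1 ≥ 5)) := by
  by_cases h1 : (1 : Int) ∈ dice <;> by_cases h2 : (2 : Int) ∈ dice <;>
    by_cases h3 : (3 : Int) ∈ dice <;> by_cases h4 : (4 : Int) ∈ dice <;>
    by_cases h5 : (5 : Int) ∈ dice <;> by_cases h6 : (6 : Int) ∈ dice <;>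
    simp_all [PySem.Set.issubset_iff, PySem.Set.mem_ofList, List.filter, List.foldl]

-- ===== VERDICT (by name: the statement is the Claim_ definition above) =====
set_option maxHeartbeats 1000000 in
theorem score_roll_spec : Claim_equal_score_roll := by
  intro dice _ _
  unfold Spec_score_roll
  simp only [score_roll, score_roll_alt]
  rw [PySem.Dict.foldl_insert_getD_add_one_eq_counter]
  have hrange : PySem.List.pyRange 1 7 1 = [1, 2, 3, 4, 5, 6] := by decide
  rw [hrange]
  simp only [PySem.Dict.contains_counter]
  simp only [max_self, ite_self]
  have hsize : (PySem.Dict.counter dice).size = (PySem.Dict.counter dice).values.length := by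
    simp [PySem.Dict.size, PySem.Dict.values]
  obtain ⟨h30, h40⟩ := straights_iff dice
  have h25 := fullhouse_iff (PySem.Dict.counter dice).values
  rw [hsize]
  simp only [h30, h40, ← h25]
  by_cases c25 : PySem.List.sorted (PySem.Dict.counter dice).values (fun v => v) = [2, 3] <;>
    by_cases c40 : ((([1,2,3,4,5,6] : List Int).filter (fun v => dice.contains v)).foldl
        (fun (st : Int × Int × Option Int) v =>
          let run := if st.2.2 = some (v - 1) then st.1 + 1 else 1
          (run, max st.2.1 run, some v)) (0, 0, none)).2.1 ≥ 5 <;>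
    by_cases c30 : ((([1,2,3,4,5,6] : List Int).filter (fun v => dice.contains v)).foldl
        (fun (st : Int × Int × Option Int) v =>
          let run := if st.2.2 = some (v - 1) then st.1 + 1 else 1
          (run, max st.2.1 run, some v)) (0, 0, none)).2.1 ≥ 4 <;>
    by_cases c50 : (PySem.List.max? (PySem.Dict.counter dice).values (fun v => v)).getD 0 = 5 <;>
    first
      | omega
      | simp only [c25, c30, c40, c50, if_pos, if_neg, PySem.List.max?_id_cons, List.foldl,
          List.nil_append, List.cons_append, Option.getD_some, not_false_iff]
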